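-- pv_equiv track=rewrite | github.com/hartleyn/fb_scraper_backend | api/views.py | sort_by_goals_scored
-- ===== SOURCE A (Python) =====
-- from operator import itemgetter
--
-- def sort_by_goals_scored(table):
-- 	final_table = []
-- 	for x in range(0, len(table)):
-- 		if x >= len(final_table):
-- 			level_on_goal_difference = []
-- 			addAmount = 1
-- 			check = True
-- 			while check:
-- 				try:
-- 					if table[x]['goal_difference'] == table[x+addAmount]['goal_difference']:
-- 						if addAmount == 1:
-- 							level_on_goal_difference.append(table[x])
-- 						level_on_goal_difference.append(table[x+addAmount])
-- 						addAmount += 1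
-- 					else:
-- 						check = False
-- 				except IndexError:
-- 					check = False
-- 				finally:
-- 					if not check:
-- 						if len(level_on_goal_difference) > 0:
-- 							fixed = sorted(level_on_goal_difference, key=itemgetter('goals_for'), reverse=True)
-- 							final_table.extend(fixed)
-- 						else:
-- 							final_table.append(table[x])
-- 	return final_table
-- ===== SOURCE B (Python) =====
-- def sort_by_goals_scored(table):
--     # dense-rank each row by its run of equal goal_difference, then ONE global
--     # stable sort of the row indices by (run id, -goals_for)
--     gids = [0] * len(table)
--     for i in range(1, len(table)):
--         gids[i] = gids[i - 1] + (table[i]['goal_difference'] != table[i - 1]['goal_difference'])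
--     order = sorted(range(len(table)), key=lambda i: (gids[i], -table[i].get('goals_for', 0)))
--     return [table[i] for i in order]
-- ===== Notes on version B (the rewrite author's own statement) =====
-- stated objective: alternative
-- what changed: Instead of detecting runs and sorting each group separately, B dense-ranks every row by its run of equal goal_difference in one pass and then performs a single global stable sort of the row indices by (run id, -goals_for).
import Mathlib
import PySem

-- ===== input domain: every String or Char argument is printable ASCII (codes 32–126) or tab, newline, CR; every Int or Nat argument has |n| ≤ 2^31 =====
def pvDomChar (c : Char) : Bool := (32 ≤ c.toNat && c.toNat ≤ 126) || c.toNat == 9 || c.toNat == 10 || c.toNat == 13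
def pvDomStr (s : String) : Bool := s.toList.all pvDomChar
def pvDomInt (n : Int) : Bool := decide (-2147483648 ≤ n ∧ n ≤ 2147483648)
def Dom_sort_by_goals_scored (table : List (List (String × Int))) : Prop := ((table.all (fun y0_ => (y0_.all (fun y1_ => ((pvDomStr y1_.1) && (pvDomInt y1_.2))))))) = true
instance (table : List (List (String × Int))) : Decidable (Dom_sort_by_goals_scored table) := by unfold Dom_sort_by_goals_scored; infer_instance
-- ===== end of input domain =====

-- B replaces A's run detection + per-group sorts by a different algorithm:
-- one pass dense-ranks every row by its run of equal goal_difference, then a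
-- single global stable sort of the row INDICES by (run id, -goals_for);
-- objective: alternative (same asymptotic cost, different structure).


-- ===== PORT A =====
-- dict lookup d['k'] on the association-list encoding: first match (exact; a
-- missing key is Python's KeyError, excluded by Pre_ — here it yields none).
def pvGet (r : List (String × Int)) (k : String) : Option Int :=
  (r.find? (fun p => p.1 == k)).map (·.2)

-- row['goal_difference'] and the sorted(..., key=itemgetter('goals_for'), reverse=True)
-- call of A (the default 0 is never used inside Pre_).
def gdOf (r : List (String × Int)) : Option Int := pvGet r "goal_difference"

def sortGF (xs : List (List (String × Int))) : List (List (String × Int)) :=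
  PySem.List.sorted xs (fun r => (pvGet r "goals_for").getD 0) true

-- the inner `while check:` loop of A: cur = table[x]; addAmount = a; level accumulator.
-- table[x+addAmount] is the Nat-index access (x, addAmount ≥ 0, so List.getElem? is
-- exact; none = the caught IndexError, which sets check = False).
def aWhile (table : List (List (String × Int))) (cur : List (String × Int))
    (x a : Nat) (level : List (List (String × Int))) : List (List (String × Int)) :=
  match h : table[x + a]? with
  | none => level
  | some next =>
    if gdOf cur = gdOf next then
      aWhile table cur x (a + 1) (level ++ (if a = 1 then [cur] else []) ++ [next])
    else level
termination_by table.length - (x + a)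
decreasing_by
  have : x + a < table.length := (List.getElem?_eq_some_iff.mp h).1
  omega

-- for x in range(0, len(table)): ...  (x ≥ 0, so Nat indices are exact; the
-- getD default [] is unreachable since x < len(table)).
def sort_by_goals_scored (table : List (List (String × Int))) : List (List (String × Int)) :=
  (List.range table.length).foldl (fun final x =>
    if final.length ≤ x then
      let cur := table.getD x []
      let level := aWhile table cur x 1 []
      if 0 < level.length then final ++ sortGF level
      else final ++ [cur]
    else final) []

-- ===== PORT B =====
-- gids = [0] * len(table); for i in range(1, len(table)):
--   gids[i] = gids[i-1] + (table[i]['goal_difference'] != table[i-1]['goal_difference'])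
-- (range(1, n) over Nat indices is exact; list assignment = List.set; the bool
-- added to an int is the 0/1 if-expression).
def bGids (table : List (List (String × Int))) : List Int :=
  (List.range' 1 (table.length - 1)).foldl
    (fun g i => g.set i (g.getD (i - 1) 0 +
      (if gdOf (table.getD i []) ≠ gdOf (table.getD (i - 1) []) then 1 else 0)))
    (List.replicate table.length 0)

-- order = sorted(range(len(table)), key=lambda i: (gids[i], -table[i].get('goals_for', 0)))
-- return [table[i] for i in order]   (tuple key → PySem.List.sorted2; .get(k, 0) → getD 0)
def sort_by_goals_scored_alt (table : List (List (String × Int))) : List (List (String × Int)) :=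
  let gids := bGids table
  let order := PySem.List.sorted2 (List.range table.length)
      (fun i => gids.getD i 0)
      (fun i => -((pvGet (table.getD i []) "goals_for").getD 0)) false
  order.map (fun i => table.getD i [])

-- ===== PRECONDITION & SPEC =====
-- Pre_ excludes exactly the inputs on which the Python A raises KeyError:
-- a row without 'goal_difference', or two adjacent rows with equal
-- goal_difference (a multi-row group, which gets sorted) one of which lacks
-- 'goals_for'. A returns normally on every other input.
def Pre_sort_by_goals_scored (table : List (List (String × Int))) : Prop :=
  (∀ r ∈ table, (gdOf r).isSome) ∧
  (∀ pr ∈ table.zip table.tail, gdOf pr.1 = gdOf pr.2 →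
    (pvGet pr.1 "goals_for").isSome ∧ (pvGet pr.2 "goals_for").isSome)
instance (table : List (List (String × Int))) : Decidable (Pre_sort_by_goals_scored table) := by
  unfold Pre_sort_by_goals_scored; infer_instance

def pvWitness_sort_by_goals_scored : (List (List (String × Int))) :=
  [[("goal_difference", 1), ("goals_for", 2)],
   [("goal_difference", 1), ("goals_for", 5)],
   [("goal_difference", 0), ("goals_for", 7)]]

def Spec_sort_by_goals_scored (table : List (List (String × Int))) (out : List (List (String × Int))) : Prop := out = sort_by_goals_scored_alt table
instance (table : List (List (String × Int))) (out : List (List (String × Int))) : Decidable (Spec_sort_by_goals_scored table out) := by unfold Spec_sort_by_goals_scored; infer_instance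

-- ===== CLAIM (what is proved, stated in full; the proofs are below) =====
def Claim_equal_sort_by_goals_scored : Prop := ∀ (table : List (List (String × Int))), Dom_sort_by_goals_scored table → Pre_sort_by_goals_scored table → Spec_sort_by_goals_scored table (sort_by_goals_scored table)

-- ===== LEMMAS AND PROOFS =====

-- ---- proof-side middle form: A's run/group structure, recursion on the list ----
def bGo (table : List (List (String × Int))) : List (List (String × Int)) :=
  match table with
  | [] => []
  | r :: rest =>
    let p := fun s => gdOf s == gdOf r
    let group := r :: rest.takeWhile p
    (if 1 < group.length then sortGF group else group) ++ bGo (rest.dropWhile p)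
termination_by table.length
decreasing_by
  simp only [List.length_cons]
  have := List.length_dropWhile_le (p := fun s => gdOf s == gdOf r) (l := rest)
  omega

-- ---- A = bGo ----

-- the inner while loop collects exactly the matching run after position x+a
-- (prefixing cur when the first probe matched, i.e. a = 1 and the run is nonempty)
theorem aWhile_eq (table : List (List (String × Int))) (cur : List (String × Int)) :
    ∀ (n x a : Nat) (level : List (List (String × Int))), table.length - (x + a) = n → 1 ≤ a →
    aWhile table cur x a level =
      level ++ (if a = 1 ∧ (table.drop (x + a)).takeWhile (fun s => gdOf s == gdOf cur) ≠ [] then [cur] else [])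
        ++ (table.drop (x + a)).takeWhile (fun s => gdOf s == gdOf cur) := by
  intro n
  induction n using Nat.strong_induction_on with
  | _ n ih =>
    intro x a level hn ha
    rw [aWhile]
    cases h : table[x + a]? with
    | none =>
      have hd : table.drop (x + a) = [] := by
        apply List.drop_eq_nil_of_le
        by_contra hcon
        have hlt : x + a < table.length := by omega
        exact absurd (List.getElem?_eq_getElem hlt) (by simp [h])
      simp [hd]
    | some next =>
      have hlt : x + a < table.length := (List.getElem?_eq_some_iff.mp h).1
      have hd : table.drop (x + a) = next :: table.drop (x + a + 1) := by
        rw [List.drop_eq_getElem_cons hlt]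
        have hx : table[x + a] = next := by
          have := List.getElem?_eq_getElem hlt
          rw [h] at this; exact (Option.some.inj this).symm
        simp [hx]
      by_cases heq : gdOf cur = gdOf next
      all_goals dsimp only
      · rw [if_pos heq]
        have ih' := ih (n - 1) (by omega) x (a + 1)
          ((level ++ if a = 1 then [cur] else []) ++ [next]) (by omega) (by omega)
        rw [show x + (a + 1) = x + a + 1 from by omega] at ih'
        rw [ih', hd]
        simp only [List.takeWhile_cons, heq.symm, beq_self_eq_true, if_pos]
        by_cases h1 : a = 1
        · simp [h1]
        · simp only [h1]
          simp
          intro h0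
          omega
      · rw [if_neg heq, hd]
        have : (gdOf next == gdOf cur) = false := by
          simp; exact fun hh => heq hh.symm
        simp [this]

-- A's step function, named for the loop lemmas
def aStep (table : List (List (String × Int)))
    (final : List (List (String × Int))) (x : Nat) : List (List (String × Int)) :=
  if final.length ≤ x then
    if 0 < (aWhile table (table.getD x []) x 1 []).length then
      final ++ sortGF (aWhile table (table.getD x []) x 1 [])
    else final ++ [table.getD x []]
  else final

theorem sort_eq_foldl_aStep (table : List (List (String × Int))) :
    sort_by_goals_scored table = (List.range table.length).foldl (aStep table) [] := rfl

-- iterations whose index is below the accumulator length are skipped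
theorem foldl_aStep_skip (table : List (List (String × Int))) :
    ∀ (j y : Nat) (acc : List (List (String × Int))), y + j ≤ acc.length →
    (List.range' y j).foldl (aStep table) acc = acc := by
  intro j
  induction j with
  | zero => intro y acc _; rfl
  | succ j ih =>
    intro y acc h
    rw [List.range'_succ, List.foldl_cons]
    have : aStep table acc y = acc := by
      unfold aStep; rw [if_neg (by omega)]
    rw [this]
    exact ih (y + 1) acc (by omega)

theorem dropWhile_eq_drop_takeWhile (l : List (List (String × Int))) (p : List (String × Int) → Bool) :
    l.dropWhile p = l.drop (l.takeWhile p).length := by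
  induction l with
  | nil => rfl
  | cons a t ih =>
    by_cases h : p a = true
    · simp [h, ih]
    · simp [h]

theorem length_sortGF (xs : List (List (String × Int))) : (sortGF xs).length = xs.length :=
  PySem.List.length_sorted ..

-- main loop invariant: from a run boundary, the rest of A's fold appends B's
-- treatment of the remaining suffix
theorem foldl_aStep_eq_bGo (table : List (List (String × Int))) :
    ∀ (m x : Nat) (acc : List (List (String × Int))), x + m = table.length →
    acc.length = x →
    (List.range' x m).foldl (aStep table) acc = acc ++ bGo (table.drop x) := by
  intro m
  induction m using Nat.strong_induction_on with
  | _ m ih =>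
    intro x acc hxm hlen
    match m with
    | 0 =>
      have : table.drop x = [] := List.drop_eq_nil_of_le (by omega)
      simp [this, bGo]
    | Nat.succ m' =>
      have hx : x < table.length := by omega
      obtain ⟨cur, rest, hd⟩ : ∃ cur rest, table.drop x = cur :: rest := by
        cases h : table.drop x with
        | nil => exact absurd (List.drop_eq_nil_iff.mp h) (by omega)
        | cons a b => exact ⟨a, b, rfl⟩
      have hcur : table.getD x [] = cur := by
        have : table[x]? = some cur := by
          rw [← List.head?_drop, hd]; rfl
        simp [List.getD, this]
      have hrest : table.drop (x + 1) = rest := by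
        have : table.drop (x + 1) = (table.drop x).tail := by
          rw [List.tail_drop]
        rw [this, hd]; rfl
      set p := fun s => gdOf s == gdOf cur with hp
      have hw := aWhile_eq table cur (table.length - (x + 1)) x 1 [] rfl (le_refl 1)
      rw [hrest] at hw
      set w := rest.takeWhile p with hwdef
      rw [List.range'_succ, List.foldl_cons]
      have hbgo : bGo (table.drop x) = (if 1 < (cur :: w).length then sortGF (cur :: w) else cur :: w) ++ bGo (rest.dropWhile p) := by
        rw [hd, bGo]
      by_cases hwe : w = []
      · -- singleton group
        have hlevel : aWhile table cur x 1 [] = [] := by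
          rw [hw]; simp [hwe]
        have hstep : aStep table acc x = acc ++ [cur] := by
          unfold aStep
          rw [if_pos (by omega), hcur, hlevel]
          simp
        rw [hstep]
        have hdrop : rest.dropWhile p = rest := by
          have := List.takeWhile_append_dropWhile (p := p) (l := rest)
          rw [← hwdef, hwe] at this; simpa using this
        have := ih m' (by omega) (x + 1) (acc ++ [cur]) (by omega) (by simp [hlen])
        rw [this, hrest, hbgo, hdrop, hwe]
        simp
      · -- group of length ≥ 2
        have hlevel : aWhile table cur x 1 [] = cur :: w := by
          rw [hw]; simp [hwe]
        set L := (cur :: w).length with hL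
        have hL1 : 1 < L := by
          have : w.length ≠ 0 := fun h => hwe (List.eq_nil_of_length_eq_zero h)
          simp [hL]; omega
        have hstep : aStep table acc x = acc ++ sortGF (cur :: w) := by
          unfold aStep
          rw [if_pos (by omega), hcur, hlevel, if_pos (by simp)]
        rw [hstep]
        have hLm : L ≤ m' + 1 := by
          have h1 : w.length ≤ rest.length := by
            rw [hwdef]; exact (List.takeWhile_sublist _).length_le
          have h2 : rest.length = table.length - (x + 1) := by
            rw [← hrest, List.length_drop]
          simp [hL]; omega
        have hlen' : (acc ++ sortGF (cur :: w)).length = x + L := by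
          rw [List.length_append, length_sortGF, hlen]
        have hsplit : List.range' (x + 1) m' = List.range' (x + 1) (L - 1) ++ List.range' (x + L) (m' + 1 - L) := by
          have h2 := List.range'_append_1 (s := x + 1) (m := L - 1) (n := m' + 1 - L)
          rw [show (x + 1) + (L - 1) = x + L from by omega] at h2
          rw [show (L - 1) + (m' + 1 - L) = m' from by omega] at h2
          exact h2.symm
        rw [hsplit, List.foldl_append]
        rw [foldl_aStep_skip table (L - 1) (x + 1) _ (by rw [hlen']; omega)]
        have hdropL : table.drop (x + L) = rest.dropWhile p := by
          have h1 : rest.dropWhile p = rest.drop w.length := by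
            rw [hwdef, dropWhile_eq_drop_takeWhile]
          have h2 : table.drop (x + L) = rest.drop (L - 1) := by
            rw [← hrest, List.drop_drop]
            congr 1; omega
          have h3 : L - 1 = w.length := by simp [hL]
          rw [h1, h2, h3]
        have := ih (m' + 1 - L) (by omega) (x + L) (acc ++ sortGF (cur :: w)) (by omega) hlen'
        rw [this, hdropL, hbgo, if_pos hL1]
        simp

theorem a_eq_bGo (table : List (List (String × Int))) :
    sort_by_goals_scored table = bGo table := by
  rw [sort_eq_foldl_aStep, List.range_eq_range']
  rw [foldl_aStep_eq_bGo table table.length 0 [] (by omega) rfl]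
  simp

-- ---- alt = bGo ----

-- run-id spec function: number of goal_difference changes strictly below i
def gSpec (table : List (List (String × Int))) : Nat → Int
  | 0 => 0
  | i + 1 => gSpec table i +
      (if gdOf (table.getD (i + 1) []) = gdOf (table.getD i []) then 0 else 1)

def bGAux (table : List (List (String × Int))) (k : Nat) : List Int :=
  (List.range' 1 k).foldl
    (fun g i => g.set i (g.getD (i - 1) 0 +
      (if gdOf (table.getD i []) ≠ gdOf (table.getD (i - 1) []) then 1 else 0)))
    (List.replicate table.length 0)

theorem bGAux_succ (table : List (List (String × Int))) (k : Nat) :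
    bGAux table (k + 1) = (bGAux table k).set (k + 1) ((bGAux table k).getD k 0 +
      (if gdOf (table.getD (k + 1) []) ≠ gdOf (table.getD k []) then 1 else 0)) := by
  unfold bGAux
  rw [List.range'_concat, List.foldl_append, List.foldl_cons, List.foldl_nil,
    show 1 + 1 * k = k + 1 from by omega]
  norm_num

theorem bGAux_spec (table : List (List (String × Int))) :
    ∀ k, (bGAux table k).length = table.length ∧
      ∀ i ≤ k, i < table.length → (bGAux table k).getD i 0 = gSpec table i := by
  intro k
  induction k with
  | zero =>
    refine ⟨by simp [bGAux], ?_⟩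
    intro i hi hin
    interval_cases i
    simp [bGAux, List.getD, gSpec]
  | succ k ih =>
    obtain ⟨hlen, hval⟩ := ih
    rw [bGAux_succ]
    refine ⟨by simp [hlen], ?_⟩
    intro i hi hin
    by_cases hik : i = k + 1
    · subst hik
      have hlt : k + 1 < (bGAux table k).length := by omega
      have hgd : (bGAux table k).getD k 0 = gSpec table k := hval k (by omega) (by omega)
      rw [List.getD, List.getElem?_set_self hlt, Option.getD_some, hgd, gSpec]
      rcases eq_or_ne (gdOf (table.getD (k + 1) [])) (gdOf (table.getD k [])) with hcase | hcase <;>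
        simp [hcase]
    · rw [List.getD, List.getElem?_set_ne (fun h => hik h.symm), ← List.getD]
      exact hval i (by omega) hin

theorem bGids_getD (table : List (List (String × Int))) (i : Nat) (hi : i < table.length) :
    (bGids table).getD i 0 = gSpec table i := by
  have : bGids table = bGAux table (table.length - 1) := rfl
  rw [this]
  exact (bGAux_spec table (table.length - 1)).2 i (by omega) hi

-- insertBy congruence / splitting toolkit
theorem insertBy_congr {α : Type} (before before' : α → α → Bool) (x : α) (ys : List α)
    (h : ∀ a ∈ ys, before x a = before' x a) :
    PySem.List.insertBy before x ys = PySem.List.insertBy before' x ys := by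
  induction ys with
  | nil => rfl
  | cons y t ih =>
    simp only [PySem.List.insertBy, h y (by simp)]
    split
    · rfl
    · rw [ih (fun a ha => h a (by simp [ha]))]

theorem foldl_insertBy_congr {α : Type} (before before' : α → α → Bool) :
    ∀ (l acc : List α),
    (∀ x ∈ l, ∀ a, (a ∈ acc ∨ a ∈ l) → before x a = before' x a) →
    l.foldl (fun acc x => PySem.List.insertBy before x acc) acc =
      l.foldl (fun acc x => PySem.List.insertBy before' x acc) acc := by
  intro l
  induction l with
  | nil => intro acc _; rfl
  | cons y t ih =>
    intro acc h
    simp only [List.foldl_cons]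
    rw [insertBy_congr before before' y acc (fun a ha => h y (by simp) a (Or.inl ha))]
    apply ih
    intro x hx a ha
    refine h x (by simp [hx]) a ?_
    rcases ha with ha | ha
    · rcases ((PySem.List.mem_insertBy _ _ _ _).mp ha) with h' | h'
      · subst h'; exact Or.inr (by simp)
      · exact Or.inl h'
    · exact Or.inr (by simp [ha])

theorem insertBy_append_not_before {α : Type} (before : α → α → Bool) (x : α)
    (p q : List α) (h : ∀ a ∈ p, before x a = false) :
    PySem.List.insertBy before x (p ++ q) = p ++ PySem.List.insertBy before x q := by
  induction p with
  | nil => rfl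
  | cons a t ih =>
    simp only [List.cons_append, PySem.List.insertBy, h a (by simp)]
    rw [ih (fun b hb => h b (by simp [hb]))]
    simp

theorem foldl_insertBy_append {α : Type} (before : α → α → Bool) (s : List α) :
    ∀ (l acc : List α), (∀ x ∈ l, ∀ a ∈ s, before x a = false) →
    l.foldl (fun acc x => PySem.List.insertBy before x acc) (s ++ acc) =
      s ++ l.foldl (fun acc x => PySem.List.insertBy before x acc) acc := by
  intro l
  induction l with
  | nil => intro acc _; rfl
  | cons y t ih =>
    intro acc h
    simp only [List.foldl_cons]
    rw [insertBy_append_not_before before y s acc (fun a ha => h y (by simp) a ha)]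
    exact ih _ (fun x hx a ha => h x (by simp [hx]) a ha)

-- a stable sort by a tuple key splits at a strict gap in the first component
theorem sorted2_append_split {α : Type} (k1 : α → Int) (k2 : α → Int) (xs ys : List α)
    (h : ∀ a ∈ xs, ∀ b ∈ ys, k1 a < k1 b) :
    PySem.List.sorted2 (xs ++ ys) k1 k2 false =
      PySem.List.sorted2 xs k1 k2 false ++ PySem.List.sorted2 ys k1 k2 false := by
  have hrfl : ∀ zs : List α, PySem.List.sorted2 zs k1 k2 false = zs.foldl (fun acc x => PySem.List.insertBy
      (fun a b => decide (k1 a < k1 b) || (!decide (k1 b < k1 a) && decide (k2 a < k2 b))) x acc) [] :=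
    fun _ => rfl
  have hmem : ∀ a ∈ PySem.List.sorted2 xs k1 k2 false, a ∈ xs :=
    fun a ha => (PySem.List.sorted2_perm xs k1 k2 false).mem_iff.mp ha
  rw [hrfl, hrfl ys, List.foldl_append, ← hrfl xs]
  have h2 := foldl_insertBy_append
    (fun a b => decide (k1 a < k1 b) || (!decide (k1 b < k1 a) && decide (k2 a < k2 b)))
    (PySem.List.sorted2 xs k1 k2 false) ys []
    (by
      intro y hy a ha
      have hax : a ∈ xs := hmem a ha
      have hlt : k1 a < k1 y := h a hax y hy
      simp [hlt, not_lt_of_gt hlt])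
  rw [hrfl xs] at h2
  simpa using h2

-- constant first key component: the tuple sort is the sort by the second key
theorem sorted2_const_k1 {α : Type} (k1 : α → Int) (k2 : α → Int) (xs : List α)
    (h : ∀ a ∈ xs, ∀ b ∈ xs, k1 a = k1 b) :
    PySem.List.sorted2 xs k1 k2 false = PySem.List.sorted xs k2 false := by
  show xs.foldl (fun acc x => PySem.List.insertBy
      (fun a b => decide (k1 a < k1 b) || (!decide (k1 b < k1 a) && decide (k2 a < k2 b))) x acc) [] = _
  rw [PySem.List.sorted_eq_foldl_insertBy]
  apply foldl_insertBy_congr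
  intro x hx a ha
  have hax : a ∈ xs := ha.resolve_left (List.not_mem_nil)
  have : k1 x = k1 a := h x hx a hax
  simp [this]

-- the first key may be replaced by any function agreeing on the list
theorem sorted2_congr_k1 {α : Type} (k1 k1' : α → Int) (k2 : α → Int) (xs : List α)
    (h : ∀ a ∈ xs, k1 a = k1' a) :
    PySem.List.sorted2 xs k1 k2 false = PySem.List.sorted2 xs k1' k2 false := by
  show xs.foldl (fun acc x => PySem.List.insertBy
      (fun a b => decide (k1 a < k1 b) || (!decide (k1 b < k1 a) && decide (k2 a < k2 b))) x acc) [] =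
    xs.foldl (fun acc x => PySem.List.insertBy
      (fun a b => decide (k1' a < k1' b) || (!decide (k1' b < k1' a) && decide (k2 a < k2 b))) x acc) []
  apply foldl_insertBy_congr
  intro x hx a ha
  have hax : a ∈ xs := ha.resolve_left (List.not_mem_nil)
  rw [h x hx, h a hax]

-- ascending by -key = descending by key
theorem sorted_neg_eq_rev {α : Type} (key : α → Int) (xs : List α) :
    PySem.List.sorted xs (fun a => -(key a)) false = PySem.List.sorted xs key true := by
  rw [PySem.List.sorted_eq_foldl_insertBy, PySem.List.sorted_rev_eq_foldl_insertBy]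
  have : (fun (a b : α) => decide (-(key a) < -(key b))) = fun a b => decide (key b < key a) := by
    funext a b
    simp [neg_lt_neg_iff]
  rw [this]

-- sorting indices then mapping = mapping then sorting (comparisons see only keys)
theorem map_sorted {α β : Type} (f : α → β) (key : β → Int) (rev : Bool) (xs : List α) :
    (PySem.List.sorted xs (fun a => key (f a)) rev).map f =
      PySem.List.sorted (xs.map f) key rev := by
  have hgen : ∀ (before : β → β → Bool) (l : List α) (acc : List β) (acc' : List α),
      acc = acc'.map f →
      (l.foldl (fun acc x => PySem.List.insertBy (fun a b => before (f a) (f b)) x acc) acc').map f =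
        (l.map f).foldl (fun acc x => PySem.List.insertBy before x acc) acc := by
    intro before l
    induction l with
    | nil => intro acc acc' h; simpa using h.symm
    | cons y t ih =>
      intro acc acc' h
      simp only [List.foldl_cons, List.map_cons]
      apply ih
      subst h
      clear ih
      induction acc' with
      | nil => rfl
      | cons a t' ih' =>
        simp only [PySem.List.insertBy, List.map_cons]
        split
        · simp
        · simp only [List.map_cons, ih']
  cases rev with
  | false =>
    rw [PySem.List.sorted_eq_foldl_insertBy, PySem.List.sorted_eq_foldl_insertBy]
    exact hgen (fun a b => decide (key a < key b)) xs [] [] rfl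
  | true =>
    rw [PySem.List.sorted_rev_eq_foldl_insertBy, PySem.List.sorted_rev_eq_foldl_insertBy]
    exact hgen (fun a b => decide (key b < key a)) xs [] [] rfl

theorem map_getD_range' (table : List (List (String × Int))) :
    ∀ (L x : Nat), x + L ≤ table.length →
    (List.range' x L).map (fun i => table.getD i []) = (table.drop x).take L := by
  intro L
  induction L with
  | zero => intro x _; simp
  | succ L ih =>
    intro x hx
    have hlt : x < table.length := by omega
    have hd : table.drop x = table[x] :: table.drop (x + 1) := List.drop_eq_getElem_cons hlt
    rw [List.range'_succ, List.map_cons, hd, List.take_succ_cons, ih (x + 1) (by omega)]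
    congr 1
    simp [List.getD, List.getElem?_eq_getElem hlt]

-- main block lemma: the global index sort, keyed by the run id, reproduces bGo
theorem sorted2_blocks (table : List (List (String × Int))) (g : Nat → Int)
    (hstep : ∀ i, g (i + 1) = g i +
      (if gdOf (table.getD (i + 1) []) = gdOf (table.getD i []) then 0 else 1)) :
    ∀ (m x : Nat), x + m = table.length →
    (PySem.List.sorted2 (List.range' x m) g
        (fun i => -((pvGet (table.getD i []) "goals_for").getD 0)) false).map
      (fun i => table.getD i []) = bGo (table.drop x) := by
  have gmono : ∀ i d, g i ≤ g (i + d) := by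
    intro i d
    induction d with
    | zero => exact le_refl _
    | succ d ih =>
      rw [show i + (d + 1) = (i + d) + 1 from rfl, hstep (i + d)]
      split_ifs <;> omega
  intro m
  induction m using Nat.strong_induction_on with
  | _ m ih =>
    intro x hxm
    match m with
    | 0 =>
      have : table.drop x = [] := List.drop_eq_nil_of_le (by omega)
      simp [this, bGo, PySem.List.sorted2]
    | Nat.succ m' =>
      have hx : x < table.length := by omega
      obtain ⟨cur, rest, hd⟩ : ∃ cur rest, table.drop x = cur :: rest := by
        cases h : table.drop x with
        | nil => exact absurd (List.drop_eq_nil_iff.mp h) (by omega)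
        | cons a b => exact ⟨a, b, rfl⟩
      have hrest : table.drop (x + 1) = rest := by
        have : table.drop (x + 1) = (table.drop x).tail := by rw [List.tail_drop]
        rw [this, hd]; rfl
      set p := fun s => gdOf s == gdOf cur with hp
      set w := rest.takeWhile p with hwdef
      set L := w.length + 1 with hLdef
      have hrl : rest.length = m' := by
        have : rest.length = table.length - (x + 1) := by rw [← hrest, List.length_drop]
        omega
      have hLm : L ≤ m' + 1 := by
        have : w.length ≤ rest.length := by rw [hwdef]; exact (List.takeWhile_sublist _).length_le
        omega
      have hmap : (List.range' x L).map (fun i => table.getD i []) = cur :: w := by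
        rw [map_getD_range' table L x (by omega), hd, hLdef, List.take_succ_cons]
        congr 1
        exact (List.prefix_iff_eq_take.mp (List.takeWhile_prefix p)).symm
      have heq : ∀ j, j < L → gdOf (table.getD (x + j) []) = gdOf cur := by
        intro j hj
        have hmem : table.getD (x + j) [] ∈ cur :: w := by
          rw [← hmap]
          exact List.mem_map_of_mem (by rw [List.mem_range'_1]; omega)
        rcases List.mem_cons.mp hmem with h' | h'
        · rw [h']
        · have := List.mem_takeWhile_imp h'
          simpa [hp] using this
      have hconst : ∀ j, j < L → g (x + j) = g x := by
        intro j
        induction j with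
        | zero => intro _; rfl
        | succ j ihj =>
          intro hj
          rw [show x + (j + 1) = (x + j) + 1 from rfl, hstep (x + j)]
          rw [show (x + j) + 1 = x + (j + 1) from rfl, heq (j + 1) hj, heq j (by omega)]
          simp [ihj (by omega)]
      have hdropL : table.drop (x + L) = rest.dropWhile p := by
        have h1 : rest.dropWhile p = rest.drop w.length := by
          rw [hwdef, dropWhile_eq_drop_takeWhile]
        have h2 : table.drop (x + L) = rest.drop (L - 1) := by
          rw [← hrest, List.drop_drop]
          congr 1; omega
        rw [h1, h2]
        congr 1
      have hgap : ∀ a ∈ List.range' x L, ∀ b ∈ List.range' (x + L) (m' + 1 - L), g a < g b := by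
        intro a ha b hb
        rw [List.mem_range'_1] at ha hb
        have hbn : b < table.length := by omega
        have hxLn : x + L < table.length := by omega
        -- the element at the run boundary fails p
        have hne : (rest.dropWhile p) ≠ [] := by
          intro hnil
          have : table.drop (x + L) = [] := by rw [hdropL, hnil]
          have := List.drop_eq_nil_iff.mp this
          omega
        have hhead : table.getD (x + L) [] = (rest.dropWhile p).head hne := by
          have h1 : (table.drop (x + L)).head? = some ((rest.dropWhile p).head hne) := by
            rw [hdropL]; exact List.head?_eq_some_head hne
          rw [List.head?_drop] at h1
          simp [List.getD, h1]
        have hpf : p ((rest.dropWhile p).head hne) = false := List.head_dropWhile_not p hne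
        have hpf' : (gdOf ((rest.dropWhile p).head hne) == gdOf cur) = false := hpf
        have hgdne : gdOf (table.getD (x + L) []) ≠ gdOf cur := by
          rw [hhead]
          intro hcontr
          rw [hcontr] at hpf'
          simp at hpf' 
        have hboundary : g (x + L) = g x + 1 := by
          have h1 : g (x + (L - 1) + 1) = g (x + (L - 1)) +
              (if gdOf (table.getD (x + (L - 1) + 1) []) = gdOf (table.getD (x + (L - 1)) []) then 0 else 1) :=
            hstep (x + (L - 1))
          rw [show x + (L - 1) + 1 = x + L from by omega] at h1
          rw [h1, hconst (L - 1) (by omega), heq (L - 1) (by omega), if_neg hgdne]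
        have h2 : g (x + L) ≤ g b := by
          have := gmono (x + L) (b - (x + L))
          rw [show x + L + (b - (x + L)) = b from by omega] at this
          exact this
        have h3 : g a = g x := by
          have := hconst (a - x) (by omega)
          rw [show x + (a - x) = a from by omega] at this
          exact this
        omega
      have hsplit : List.range' x (m' + 1) = List.range' x L ++ List.range' (x + L) (m' + 1 - L) := by
        have h2 := List.range'_append_1 (s := x) (m := L) (n := m' + 1 - L)
        rw [show L + (m' + 1 - L) = m' + 1 from by omega] at h2
        exact h2.symm
      rw [hsplit, sorted2_append_split _ _ _ _ hgap, List.map_append]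
      have hfirst : (PySem.List.sorted2 (List.range' x L) g
          (fun i => -((pvGet (table.getD i []) "goals_for").getD 0)) false).map
          (fun i => table.getD i []) = sortGF (cur :: w) := by
        rw [sorted2_const_k1 _ _ _ (by
          intro a ha b hb
          rw [List.mem_range'_1] at ha hb
          have h3 : g a = g x := by
            have := hconst (a - x) (by omega)
            rw [show x + (a - x) = a from by omega] at this
            exact this
          have h4 : g b = g x := by
            have := hconst (b - x) (by omega)
            rw [show x + (b - x) = b from by omega] at this
            exact this
          rw [h3, h4])]
        rw [sorted_neg_eq_rev (fun i => (pvGet (table.getD i []) "goals_for").getD 0)]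
        rw [map_sorted (fun i => table.getD i []) (fun r => (pvGet r "goals_for").getD 0) true]
        rw [hmap]
        rfl
      rw [hfirst]
      rw [ih (m' + 1 - L) (by omega) (x + L) (by omega), hdropL]
      rw [hd, bGo]
      have hif : (if 1 < (cur :: rest.takeWhile (fun s => gdOf s == gdOf cur)).length
          then sortGF (cur :: rest.takeWhile (fun s => gdOf s == gdOf cur))
          else cur :: rest.takeWhile (fun s => gdOf s == gdOf cur)) = sortGF (cur :: w) := by
        rw [hp] at hwdef
        rw [← hwdef]
        split
        · rfl
        · next hn =>
          have hwnil : w = [] := by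
            have : w.length = 0 := by simpa using hn
            exact List.eq_nil_of_length_eq_zero this
          rw [hwnil]
          rfl
      rw [hif]

theorem alt_eq_bGo (table : List (List (String × Int))) :
    sort_by_goals_scored_alt table = bGo table := by
  show (PySem.List.sorted2 (List.range table.length)
      (fun i => (bGids table).getD i 0)
      (fun i => -((pvGet (table.getD i []) "goals_for").getD 0)) false).map
    (fun i => table.getD i []) = bGo table
  rw [sorted2_congr_k1 (fun i => (bGids table).getD i 0) (gSpec table) _ _ (by
    intro a ha
    exact bGids_getD table a (by simpa using List.mem_range.mp ha))]
  rw [List.range_eq_range']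
  rw [sorted2_blocks table (gSpec table) (fun i => rfl) table.length 0 (by omega)]
  simp

-- ===== VERDICT (by name: the statement is the Claim_ definition above) =====
theorem sort_by_goals_scored_spec : Claim_equal_sort_by_goals_scored := by
  intro table _ _
  show sort_by_goals_scored table = sort_by_goals_scored_alt table
  rw [a_eq_bGo, alt_eq_bGo]
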